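-- pv_equiv track=rewrite | github.com/summarization-team/summary | src/model/content_realizer.py | _truncate_sentences
-- ===== SOURCE A (Python) =====
-- import string
--
-- def is_punctuation(word):
--     """
--     Checks if the given word consists entirely of punctuation characters.
--
--     Args:
--         word (str): The word to be checked.
--
--     Returns:
--         bool: True if the word consists only of punctuation characters, False otherwise.
--     """
--     return all(char in string.punctuation for char in word)
--
-- def _truncate_sentences(content, max_length):
--     """
--     Truncate a list of sentences to meet a specified maximum word count.
--
--     This function takes a list of sentences, where each sentence is represented as a list of words.
--     Starting with the first sentence in the list, it selects consecutive sentences until the total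
--     word count reaches or exceeds the specified maximum word count.
--
--     Args:
--         content (list of list of str): A list of sentencesd, where each sentence is a list of words.
--         max_length (int): The maximum word count to which the sentences should be truncated.
--
--     Returns:
--         list of list of str: A truncated list of sentences that collectively have a word count less
--         than or equal to the specified maximum word count.
--     """
--     truncated_content = []  # Initialize an empty list of sentences
--     total_word_count = 0
--
--     for sentence in content:
--         sentence_word_count = 0
--
--         for word in sentence:
--             if not is_punctuation(word):
--                 sentence_word_count += 1
--
--         if total_word_count + sentence_word_count <= max_length:
--             truncated_content.append(sentence)
--             total_word_count += sentence_word_count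
--         else:
--             break  # Stop adding sentences when the word limit is reached
--
--     return truncated_content
-- ===== SOURCE B (Python) =====
-- import string
--
-- def is_punctuation(word):
--     return all(char in string.punctuation for char in word)
--
-- def _truncate_sentences(content, max_length):
--     # Table-then-slice: precompute per-sentence non-punctuation word counts,
--     # build running totals, keep the prefix of sentences whose running total
--     # stays within max_length (totals are monotone since counts are >= 0).
--     counts = [len([w for w in sentence if not is_punctuation(w)]) for sentence in content]
--     sums = []
--     t = 0
--     for c in counts:
--         t += c
--         sums.append(t)
--     n = sum(1 for t in sums if t <= max_length)
--     return content[:n]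
-- ===== Notes on version B (the rewrite author's own statement) =====
-- stated objective: alternative
-- what changed: Replaces A's fused greedy loop (count each sentence, append, break on overflow) with a precomputed per-sentence count table, an explicit running-totals list, a count of totals within the limit, and a final slice content[:n]; correctness uses that counts are non-negative so totals are monotone.
import Mathlib
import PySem

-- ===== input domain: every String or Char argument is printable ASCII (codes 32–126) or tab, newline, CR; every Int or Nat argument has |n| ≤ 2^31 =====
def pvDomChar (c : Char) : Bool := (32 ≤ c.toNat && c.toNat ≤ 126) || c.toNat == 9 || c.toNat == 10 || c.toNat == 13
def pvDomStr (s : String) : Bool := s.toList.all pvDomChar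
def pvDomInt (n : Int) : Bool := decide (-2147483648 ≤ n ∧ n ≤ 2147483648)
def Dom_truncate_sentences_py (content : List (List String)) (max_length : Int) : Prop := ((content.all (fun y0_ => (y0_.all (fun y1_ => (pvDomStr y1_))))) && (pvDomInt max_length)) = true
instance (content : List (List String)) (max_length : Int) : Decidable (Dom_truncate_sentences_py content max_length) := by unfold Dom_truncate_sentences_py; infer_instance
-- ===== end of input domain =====

-- B replaces A's fused count-and-break loop by a count-table + running-sums + slice decomposition (objective: alternative).


-- ===== PORT A =====
-- string.punctuation
def pvPunct : List Char := "!\"#$%&'()*+,-./:;<=>?@[\\]^_`{|}~".toList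

-- all(char in string.punctuation for char in word)
def is_punctuation_py (word : String) : Bool :=
  word.toList.all (fun c => pvPunct.contains c)

-- inner loop: sentence_word_count
def pvSentCount (sentence : List String) : Int :=
  sentence.foldl (fun acc w => if is_punctuation_py w then acc else acc + 1) 0

-- outer loop with break, carrying total_word_count
def pvTruncGo (max_length : Int) : List (List String) → Int → List (List String)
  | [], _ => []
  | s :: rest, total =>
    let c := pvSentCount s
    if total + c ≤ max_length then s :: pvTruncGo max_length rest (total + c) else []

def truncate_sentences_py (content : List (List String)) (max_length : Int) : List (List String) :=
  pvTruncGo max_length content 0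

-- ===== PORT B =====
-- len([w for w in sentence if not is_punctuation(w)])
def pvSentCountB (sentence : List String) : Int :=
  ((sentence.filter (fun w => !is_punctuation_py w)).length : Int)

-- the running-totals loop building `sums`
def pvAccumFrom (t : Int) : List Int → List Int
  | [] => []
  | c :: rest => (t + c) :: pvAccumFrom (t + c) rest

def truncate_sentences_py_alt (content : List (List String)) (max_length : Int) : List (List String) :=
  let counts := content.map pvSentCountB
  let sums := pvAccumFrom 0 counts
  let n := (sums.filter (fun t => decide (t ≤ max_length))).length
  content.take n

-- ===== PRECONDITION & SPEC =====
def Spec_truncate_sentences_py (content : List (List String)) (max_length : Int) (out : List (List String)) : Prop := out = truncate_sentences_py_alt content max_length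
instance (content : List (List String)) (max_length : Int) (out : List (List String)) : Decidable (Spec_truncate_sentences_py content max_length out) := by unfold Spec_truncate_sentences_py; infer_instance

-- ===== CLAIM (what is proved, stated in full; the proofs are below) =====
def Claim_equal_truncate_sentences_py : Prop := ∀ (content : List (List String)) (max_length : Int), Dom_truncate_sentences_py content max_length → Spec_truncate_sentences_py content max_length (truncate_sentences_py content max_length)

-- ===== LEMMAS AND PROOFS =====

-- A's fold-count equals B's filter-length count
theorem pvSentCount_foldl (sentence : List String) (acc : Int) :
    sentence.foldl (fun a w => if is_punctuation_py w then a else a + 1) acc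
      = acc + ((sentence.filter (fun w => !is_punctuation_py w)).length : Int) := by
  induction sentence generalizing acc with
  | nil => simp
  | cons w ws ih =>
    by_cases h : is_punctuation_py w = true <;>
      simp [List.foldl, List.filter, h, ih] <;> ring

theorem pvSentCount_eq (sentence : List String) : pvSentCount sentence = pvSentCountB sentence := by
  simpa [pvSentCount, pvSentCountB] using pvSentCount_foldl sentence 0

-- every running total is at least its starting value (counts are non-negative)
theorem pvAccum_ge (cs : List Int) (h : ∀ c ∈ cs, 0 ≤ c) (t : Int) :
    ∀ x ∈ pvAccumFrom t cs, t ≤ x := by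
  induction cs generalizing t with
  | nil => intro x hx; simp [pvAccumFrom] at hx
  | cons c rest ih =>
    intro x hx
    have hc : 0 ≤ c := h c (by simp)
    simp only [pvAccumFrom, List.mem_cons] at hx
    rcases hx with rfl | hx
    · omega
    · have := ih (fun c' hc' => h c' (by simp [hc'])) (t + c) x hx
      omega

theorem pvCounts_nonneg (content : List (List String)) :
    ∀ c ∈ content.map pvSentCountB, 0 ≤ c := by
  intro c hc
  rcases List.mem_map.mp hc with ⟨s, _, rfl⟩
  simp [pvSentCountB]

-- the main invariant: A's loop from any running total equals B's slice
theorem pvTrunc_main (max_length : Int) (content : List (List String)) (total : Int) :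
    pvTruncGo max_length content total
      = content.take ((pvAccumFrom total (content.map pvSentCountB)).filter
          (fun t => decide (t ≤ max_length))).length := by
  induction content generalizing total with
  | nil => simp [pvTruncGo, pvAccumFrom]
  | cons s rest ih =>
    have hc := pvSentCount_eq s
    by_cases h : total + pvSentCountB s ≤ max_length
    · simp [pvTruncGo, pvAccumFrom, hc, h, ih]
    · have hempty : (pvAccumFrom (total + pvSentCountB s) (rest.map pvSentCountB)).filter
          (fun t => decide (t ≤ max_length)) = [] := by
        apply List.filter_eq_nil_iff.mpr
        intro x hx
        have := pvAccum_ge (rest.map pvSentCountB) (pvCounts_nonneg rest) (total + pvSentCountB s) x hx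
        simpa using by omega
      simp [pvTruncGo, pvAccumFrom, hc, h, hempty]

-- ===== VERDICT (by name: the statement is the Claim_ definition above) =====
theorem truncate_sentences_py_spec : Claim_equal_truncate_sentences_py := by
  intro content max_length _
  unfold Spec_truncate_sentences_py truncate_sentences_py truncate_sentences_py_alt
  exact pvTrunc_main max_length content 0
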